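-- pv_equiv track=rewrite | github.com/Digital-Physics/algorithms | icd_codes.py | icd_counter2
-- ===== SOURCE A (Python) =====
-- from typing import List, Dict
--
-- def icd_counter2(list_of_lists: List[List[str]]) -> Dict[str, int]:
--     """graph analysis: list of fully connected graphs provided.
--     function counts the number of connected icd_codes for each icd_code node."""
--
--     node_dict = {} # icd_code: [count, set_of_edges]
--
--     for icd_list in list_of_lists:
--         fully_connected_nodes = set()
--
--         # create the set
--         for icd in icd_list:
--             fully_connected_nodes.add(icd)
--
--             # init if needed; default dict could probably be a better choice
--             if icd not in node_dict:
--                 node_dict[icd] = [0, set()]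
--
--         # go through potential icd code nodes that will need to be incremented
--         for relation_start in fully_connected_nodes:
--             for relation_end in fully_connected_nodes:
--                 if relation_start != relation_end and relation_end not in node_dict[relation_start][1]:
--                     node_dict[relation_start][1].add(relation_end)
--                     node_dict[relation_start][0] += 1
--
--     return {k: node_dict[k][0] for k in node_dict.keys()}
-- ===== SOURCE B (Python) =====
-- from typing import List, Dict
--
-- def icd_counter2(list_of_lists: List[List[str]]) -> Dict[str, int]:
--     """Two-phase inverted index: one pass builds node -> list of the clique
--     sets it appears in; then each node's count is the size of a single union
--     over its cliques, minus one (itself)."""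
--     cliques_of = {}
--     for icd_list in list_of_lists:
--         nodeset = set(icd_list)
--         for icd in icd_list:
--             cliques_of.setdefault(icd, []).append(nodeset)
--     return {node: len(set().union(*cliques)) - 1
--             for node, cliques in cliques_of.items()}
-- ===== Notes on version B (the rewrite author's own statement) =====
-- stated objective: faster
-- what changed: Replaces A's incremental maintenance of per-node [count, edge-set] pairs (nested loops over every pair of clique members with a membership test and counter increment) by a two-phase inverted index: one pass builds node -> list of the clique sets the node appears in, then each node's count is computed at the end as the size of one union over its cliques minus one.
import Mathlib
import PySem

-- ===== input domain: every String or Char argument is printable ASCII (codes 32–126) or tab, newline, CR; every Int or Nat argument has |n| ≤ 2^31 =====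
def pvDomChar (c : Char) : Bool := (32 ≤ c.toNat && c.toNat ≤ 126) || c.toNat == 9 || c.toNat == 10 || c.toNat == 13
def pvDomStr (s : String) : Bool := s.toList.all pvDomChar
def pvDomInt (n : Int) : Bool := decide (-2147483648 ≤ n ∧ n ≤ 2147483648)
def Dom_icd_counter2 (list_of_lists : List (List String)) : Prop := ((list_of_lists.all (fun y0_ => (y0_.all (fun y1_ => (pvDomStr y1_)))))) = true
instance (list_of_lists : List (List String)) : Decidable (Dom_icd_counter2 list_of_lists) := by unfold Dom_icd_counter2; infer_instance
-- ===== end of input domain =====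

-- B replaces A's incremental per-node [count, edge-set] maintenance (nested pair loops per clique)
-- by a two-phase inverted index node -> list of clique sets, counts read off by one union per node
-- at the end; objective: faster (constant-factor: bulk unions replace per-pair loops).

-- ===== PORT A =====
-- inner 'for relation_end in fully_connected_nodes' loop for a fixed relation_start
def icd_inner (fcn : PySem.Set String) (nd : PySem.Dict String (Int × PySem.Set String))
    (rs : String) : PySem.Dict String (Int × PySem.Set String) :=
  fcn.foldl (fun nd re =>
    if rs ≠ re ∧ ¬ (PySem.Set.contains (nd.getD rs (0, PySem.Set.empty)).2 re = true) then
      nd.modify rs (0, PySem.Set.empty) (fun p => (p.1 + 1, PySem.Set.add p.2 re))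
    else nd) nd

-- body of 'for icd_list in list_of_lists'
def icd_step (nd : PySem.Dict String (Int × PySem.Set String)) (icd_list : List String) :
    PySem.Dict String (Int × PySem.Set String) :=
  let p := icd_list.foldl (fun p icd =>
      (PySem.Set.add p.1 icd,
       if p.2.contains icd then p.2 else p.2.insert icd (0, PySem.Set.empty)))
    ((PySem.Set.empty : PySem.Set String), nd)
  p.1.foldl (icd_inner p.1) p.2

def icd_counter2 (list_of_lists : List (List String)) : List (String × Int) :=
  let nd := list_of_lists.foldl icd_step PySem.Dict.empty
  nd.keys.map (fun k => (k, (nd.getD k (0, PySem.Set.empty)).1))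

-- ===== PORT B =====
-- body of 'for icd_list in list_of_lists': append this list's nodeset to every member's clique list
def icd_collect (m : PySem.Dict String (List (PySem.Set String))) (icd_list : List String) :
    PySem.Dict String (List (PySem.Set String)) :=
  let nodeset := PySem.Set.ofList icd_list
  icd_list.foldl (fun m icd => m.modify icd [] (fun cs => cs ++ [nodeset])) m

def icd_counter2_alt (list_of_lists : List (List String)) : List (String × Int) :=
  let m := list_of_lists.foldl icd_collect PySem.Dict.empty
  m.items.map (fun p =>
    (p.1, PySem.Set.len (p.2.foldl PySem.Set.union PySem.Set.empty) - 1))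

-- ===== PRECONDITION & SPEC =====
def Spec_icd_counter2 (list_of_lists : List (List String)) (out : List (String × Int)) : Prop := out = icd_counter2_alt list_of_lists
instance (list_of_lists : List (List String)) (out : List (String × Int)) : Decidable (Spec_icd_counter2 list_of_lists out) := by unfold Spec_icd_counter2; infer_instance

-- ===== CLAIM (what is proved, stated in full; the proofs are below) =====
def Claim_equal_icd_counter2 : Prop := ∀ (list_of_lists : List (List String)), Dom_icd_counter2 list_of_lists → Spec_icd_counter2 list_of_lists (icd_counter2 list_of_lists)

-- ===== LEMMAS AND PROOFS =====

-- x is a co-member of k in some list of ll, other than k itself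
def coOcc (ll : List (List String)) (k x : String) : Prop :=
  x ≠ k ∧ ∃ l ∈ ll, k ∈ l ∧ x ∈ l

-- the joint invariant of the two folds after processing the lists ll
def RelInv (ll : List (List String)) (a : PySem.Dict String (Int × PySem.Set String))
    (b : PySem.Dict String (List (PySem.Set String))) : Prop :=
  a.keys = b.keys ∧ b.keys.Nodup ∧
  (∀ k, k ∈ b.keys ↔ ∃ l ∈ ll, k ∈ l) ∧
  ∀ k,
    (a.getD k (0, PySem.Set.empty)).1 = (((a.getD k (0, PySem.Set.empty)).2.length : Int)) ∧
    (a.getD k (0, PySem.Set.empty)).2.Nodup ∧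
    k ∉ (a.getD k (0, PySem.Set.empty)).2 ∧
    (∀ x, x ∈ (a.getD k (0, PySem.Set.empty)).2 ↔ coOcc ll k x) ∧
    (∀ t, t ∈ b.getD k [] ↔ ∃ l ∈ ll, k ∈ l ∧ t = PySem.Set.ofList l)

-- A's inner relation_end loop, as a pure function of the single entry it touches
def gA (rs : String) (p : Int × PySem.Set String) (re : String) : Int × PySem.Set String :=
  if rs ≠ re ∧ ¬ (PySem.Set.contains p.2 re = true) then (p.1 + 1, PySem.Set.add p.2 re) else p

theorem setdefold_get? {ν : Type} (lst : List String) (a : PySem.Dict String ν) (v0 : ν) (k : String) :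
    (lst.foldl (fun d x => d.setdefault x v0) a).get? k =
      if k ∈ lst then some ((a.get? k).getD v0) else a.get? k := by
  induction lst generalizing a with
  | nil => simp
  | cons x xs ih =>
    simp only [List.foldl_cons, ih, List.mem_cons]
    by_cases hx : k = x
    · subst hx
      rw [PySem.Dict.get?_setdefault_self]
      simp
    · rw [PySem.Dict.get?_setdefault_of_ne (hne := hx)]
      simp [hx]

theorem setdefold_keys {ν : Type} (lst : List String) (a : PySem.Dict String ν) (v0 : ν) :
    (lst.foldl (fun d x => d.setdefault x v0) a).keys = PySem.Set.update a.keys lst := by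
  induction lst generalizing a with
  | nil => simp [PySem.Set.update_nil]
  | cons x xs ih =>
    rw [List.foldl_cons, ih, PySem.Set.update_cons, PySem.Dict.keys_setdefault,
      PySem.Set.add_eq_ite]
    by_cases hx : x ∈ a.keys
    · simp [hx, (PySem.Dict.contains_iff_mem_keys a x).2 hx]
    · have hc : a.contains x = false := by
        rw [← Bool.not_eq_true]; exact fun h => hx ((PySem.Dict.contains_iff_mem_keys a x).1 h)
      simp [hx, hc]

theorem initA_eq (lst : List String) (a : PySem.Dict String (Int × PySem.Set String)) :
    lst.foldl (fun p icd =>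
        (PySem.Set.add p.1 icd,
         if p.2.contains icd then p.2 else p.2.insert icd (0, PySem.Set.empty)))
      ((PySem.Set.empty : PySem.Set String), a) =
    (PySem.Set.ofList lst, lst.foldl (fun d x => d.setdefault x (0, PySem.Set.empty)) a) := by
  rw [PySem.Set.ofList_eq_foldl,
    PySem.List.foldl_prod_mk (f := fun s e => PySem.Set.add s e)
      (g := fun (d : PySem.Dict String (Int × PySem.Set String)) e =>
        if d.contains e then d else d.insert e (0, PySem.Set.empty))]
  have : (fun (d : PySem.Dict String (Int × PySem.Set String)) e =>
      if d.contains e then d else d.insert e (0, PySem.Set.empty)) =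
      (fun (d : PySem.Dict String (Int × PySem.Set String)) e =>
        d.setdefault e (0, PySem.Set.empty)) := by
    funext d e
    cases h : d.contains e
    · simp [PySem.Dict.setdefault_of_not_contains d _ h]
    · simp [PySem.Dict.setdefault_of_contains d _ h]
  rw [this]
  rfl

theorem icd_inner_getD (fcn : PySem.Set String) (nd : PySem.Dict String (Int × PySem.Set String))
    (rs k : String) :
    (icd_inner fcn nd rs).getD k (0, PySem.Set.empty) =
      if k = rs then fcn.foldl (gA rs) (nd.getD rs (0, PySem.Set.empty))
      else nd.getD k (0, PySem.Set.empty) := by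
  unfold icd_inner
  induction fcn generalizing nd with
  | nil =>
    by_cases hk : k = rs
    · subst hk; simp
    · simp [hk]
  | cons re rest ih =>
    rw [List.foldl_cons, ih]
    have hrs : (if rs ≠ re ∧ ¬(PySem.Set.contains (nd.getD rs (0, PySem.Set.empty)).2 re = true)
        then nd.modify rs (0, PySem.Set.empty) (fun p => (p.1 + 1, PySem.Set.add p.2 re))
        else nd).getD rs (0, PySem.Set.empty) = gA rs (nd.getD rs (0, PySem.Set.empty)) re := by
      unfold gA
      split_ifs with h
      · simp
      · rfl
    by_cases hk : k = rs
    · subst hk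
      simp only [hrs, List.foldl_cons]
      simp
    · simp only [if_neg hk]
      split_ifs with h
      · rw [PySem.Dict.getD_modify]; simp [hk]
      · rfl

theorem icd_inner_keys (fcn : PySem.Set String) (nd : PySem.Dict String (Int × PySem.Set String))
    (rs : String) (h : rs ∈ nd.keys) : (icd_inner fcn nd rs).keys = nd.keys := by
  unfold icd_inner
  induction fcn generalizing nd with
  | nil => rfl
  | cons re rest ih =>
    have hone : ∀ nd' : PySem.Dict String (Int × PySem.Set String), rs ∈ nd'.keys →
        ((if rs ≠ re ∧ ¬(PySem.Set.contains (nd'.getD rs (0, PySem.Set.empty)).2 re = true)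
          then nd'.modify rs (0, PySem.Set.empty) (fun p => (p.1 + 1, PySem.Set.add p.2 re))
          else nd').keys = nd'.keys) := by
      intro nd' h'
      split_ifs with hc
      · rw [PySem.Dict.keys_modify,
          PySem.Dict.keys_insert_of_contains _ _ ((PySem.Dict.contains_iff_mem_keys nd' rs).2 h')]
      · rfl
    rw [List.foldl_cons, ih _ (by rw [hone nd h]; exact h), hone nd h]

theorem outerA_getD (l : List String) (u : PySem.Set String)
    (nd : PySem.Dict String (Int × PySem.Set String)) (k : String) (hnd : l.Nodup) :
    ((l.foldl (icd_inner u) nd).getD k (0, PySem.Set.empty)) =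
      if k ∈ l then u.foldl (gA k) (nd.getD k (0, PySem.Set.empty))
      else nd.getD k (0, PySem.Set.empty) := by
  induction l generalizing nd with
  | nil => simp
  | cons x xs ih =>
    have hx : x ∉ xs := (List.nodup_cons.1 hnd).1
    rw [List.foldl_cons, ih _ (List.nodup_cons.1 hnd).2]
    by_cases hk : k = x
    · subst hk
      have hrw : (icd_inner u nd k).getD k (0, PySem.Set.empty) =
          List.foldl (gA k) (nd.getD k (0, PySem.Set.empty)) u := by
        rw [icd_inner_getD, if_pos rfl]
      rw [hrw]
      simp [hx]
    · have hrw : (icd_inner u nd x).getD k (0, PySem.Set.empty) =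
          nd.getD k (0, PySem.Set.empty) := by
        rw [icd_inner_getD, if_neg hk]
      rw [hrw]
      simp [List.mem_cons, hk]

theorem outerA_keys (l : List String) (u : PySem.Set String)
    (nd : PySem.Dict String (Int × PySem.Set String)) (hsub : ∀ x ∈ l, x ∈ nd.keys) :
    (l.foldl (icd_inner u) nd).keys = nd.keys := by
  induction l generalizing nd with
  | nil => rfl
  | cons x xs ih =>
    have hk : (icd_inner u nd x).keys = nd.keys := icd_inner_keys u nd x (hsub x (by simp))
    rw [List.foldl_cons, ih _ (fun y hy => by rw [hk]; exact hsub y (List.mem_cons_of_mem _ hy)), hk]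

theorem gA_fold (k : String) (u : List String) (s : PySem.Set String)
    (hu : u.Nodup) (hs : s.Nodup) :
    u.foldl (gA k) ((s.length : Int), s) =
      (((s ++ u.filter (fun x => !(x == k) && !(s.contains x))).length : Int),
       s ++ u.filter (fun x => !(x == k) && !(s.contains x))) := by
  induction u generalizing s with
  | nil => simp
  | cons x xs ih =>
    have hx : x ∉ xs := (List.nodup_cons.1 hu).1
    have hxs : xs.Nodup := (List.nodup_cons.1 hu).2
    rw [List.foldl_cons]
    by_cases hcond : k ≠ x ∧ x ∉ s
    · have hadd : PySem.Set.add s x = s ++ [x] := PySem.Set.add_of_not_mem hcond.2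
      have hg : gA k ((s.length : Int), s) x = (((s ++ [x]).length : Int), s ++ [x]) := by
        unfold gA
        rw [if_pos ⟨hcond.1, fun hm => hcond.2 ((PySem.Set.contains_iff s x).1 hm)⟩, hadd]
        simp
      have hnd' : (s ++ [x]).Nodup := by
        simp [List.nodup_append, hs]
        exact fun a ha hax => hcond.2 (hax ▸ ha)
      rw [hg, ih (s ++ [x]) hxs hnd']
      have hfil : xs.filter (fun y => !(y == k) && !((s ++ [x]).contains y)) =
          xs.filter (fun y => !(y == k) && !(s.contains y)) := by
        refine List.filter_congr (fun y hy => ?_)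
        have hyx : y ≠ x := fun hh => hx (hh ▸ hy)
        simp [hyx]
      have hL : (s ++ [x]) ++ xs.filter (fun y => !(y == k) && !((s ++ [x]).contains y)) =
          s ++ (x :: xs).filter (fun y => !(y == k) && !(s.contains y)) := by
        rw [hfil]
        simp [List.append_assoc, Ne.symm hcond.1, hcond.2]
      rw [hL]
    · have hPx : (!(x == k) && !(s.contains x)) = false := by
        rcases not_and_or.1 hcond with h1 | h2
        · have : x = k := (not_not.1 (fun hh => h1 (Ne.symm hh)))
          simp [this]
        · simp [not_not.1 h2]
      have hg : gA k ((s.length : Int), s) x = ((s.length : Int), s) := by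
        unfold gA
        rw [if_neg]
        rintro ⟨h1, h2⟩
        exact hcond ⟨h1, fun hm => h2 ((PySem.Set.contains_iff s x).2 hm)⟩
      have hprop : ¬(¬x = k ∧ x ∉ s) := fun hh => hcond ⟨Ne.symm hh.1, hh.2⟩
      rw [hg, ih s hxs hs]
      simp [hprop]

-- B's inner loop: what the clique-list of each key becomes
theorem collect_getD (l : List String) (s : PySem.Set String)
    (m : PySem.Dict String (List (PySem.Set String))) (k : String) :
    (l.foldl (fun m icd => m.modify icd [] (fun cs => cs ++ [s])) m).getD k [] =
      m.getD k [] ++ ((l.filter (fun icd => icd == k)).map (fun _ => s)) := by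
  induction l generalizing m with
  | nil => simp
  | cons x xs ih =>
    rw [List.foldl_cons, ih]
    by_cases hk : x = k
    · subst hk
      rw [PySem.Dict.getD_modify, if_pos rfl]
      simp [List.append_assoc]
    · rw [PySem.Dict.getD_modify, if_neg (fun h => hk h.symm)]
      simp [hk]

-- the union of a list of Sets: Nodup, and membership is membership in one of them
theorem foldl_union_spec (css : List (PySem.Set String)) (acc : PySem.Set String)
    (hacc : acc.Nodup) :
    (css.foldl PySem.Set.union acc).Nodup ∧
      ∀ x, x ∈ css.foldl PySem.Set.union acc ↔ x ∈ acc ∨ ∃ t ∈ css, x ∈ t := by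
  induction css generalizing acc with
  | nil => simp [hacc]
  | cons c cs ih =>
    obtain ⟨h1, h2⟩ := ih (PySem.Set.union acc c) (PySem.Set.nodup_union acc c hacc)
    refine ⟨h1, fun x => ?_⟩
    rw [List.foldl_cons, h2 x, PySem.Set.mem_union]
    simp only [List.mem_cons]
    constructor
    · rintro ((h | h) | ⟨t, ht, hx⟩)
      · exact Or.inl h
      · exact Or.inr ⟨c, Or.inl rfl, h⟩
      · exact Or.inr ⟨t, Or.inr ht, hx⟩
    · rintro (h | ⟨t, (rfl | ht), hx⟩)
      · exact Or.inl (Or.inl h)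
      · exact Or.inl (Or.inr hx)
      · exact Or.inr ⟨t, ht, hx⟩

theorem relInv_step (ll : List (List String))
    (a : PySem.Dict String (Int × PySem.Set String))
    (b : PySem.Dict String (List (PySem.Set String))) (lst : List String)
    (h : RelInv ll a b) : RelInv (ll ++ [lst]) (icd_step a lst) (icd_collect b lst) := by
  obtain ⟨hkeys, hnd, hmemk, hval⟩ := h
  have hfcn : (PySem.Set.ofList lst).Nodup := PySem.Set.nodup_ofList lst
  unfold icd_step icd_collect
  simp only []
  rw [initA_eq]
  simp only []
  set a' := lst.foldl (fun d x => d.setdefault x ((0 : Int), (PySem.Set.empty : PySem.Set String))) a with ha'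
  set fcn := PySem.Set.ofList lst with hfcndef
  have hka' : a'.keys = PySem.Set.update a.keys lst := setdefold_keys lst a _
  have hsuba : ∀ x ∈ fcn, x ∈ a'.keys := by
    intro x hx
    rw [hka']
    exact (PySem.Set.mem_update a.keys lst x).2 (Or.inr ((PySem.Set.mem_ofList lst x).1 hx))
  have hga' : ∀ k, a'.getD k (0, PySem.Set.empty) = a.getD k (0, PySem.Set.empty) := by
    intro k
    rw [PySem.Dict.getD_eq_get?_getD, ha', setdefold_get?]
    split_ifs <;> simp [PySem.Dict.getD_eq_get?_getD]
  have hbkeys : (lst.foldl (fun m icd => m.modify icd [] (fun cs => cs ++ [fcn])) b).keys =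
      PySem.Set.update b.keys lst :=
    PySem.Dict.keys_foldl_modify lst [] (fun _ _ cs => cs ++ [fcn]) b
  refine ⟨?_, ?_, ?_, ?_⟩
  · rw [outerA_keys fcn fcn a' hsuba, hka', hbkeys, hkeys]
  · rw [hbkeys]
    exact PySem.Set.nodup_update b.keys lst hnd
  · intro k
    rw [hbkeys, PySem.Set.mem_update, hmemk k]
    constructor
    · rintro (⟨l, hl, hkl⟩ | hk)
      · exact ⟨l, List.mem_append_left _ hl, hkl⟩
      · exact ⟨lst, List.mem_append_right _ (by simp), hk⟩
    · rintro ⟨l, hl, hkl⟩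
      rcases List.mem_append.1 hl with hl | hl
      · exact Or.inl ⟨l, hl, hkl⟩
      · exact Or.inr ((List.mem_singleton.1 hl) ▸ hkl)
  · intro k
    obtain ⟨hv1, hv2, hv3, hv4, hv5⟩ := hval k
    have hB : ∀ t, t ∈ (lst.foldl (fun m icd => m.modify icd [] (fun cs => cs ++ [fcn])) b).getD k [] ↔
        ∃ l ∈ ll ++ [lst], k ∈ l ∧ t = PySem.Set.ofList l := by
      intro t
      rw [collect_getD, List.mem_append, hv5 t]
      constructor
      · rintro (⟨l, hl, hkl, rfl⟩ | ht)
        · exact ⟨l, List.mem_append_left _ hl, hkl, rfl⟩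
        · rcases List.mem_map.1 ht with ⟨icd, hicd, rfl⟩
          have : k ∈ lst := by
            have := (List.mem_filter.1 hicd)
            have heq : icd = k := by simpa using this.2
            exact heq ▸ this.1
          exact ⟨lst, List.mem_append_right _ (by simp), this, rfl⟩
      · rintro ⟨l, hl, hkl, rfl⟩
        rcases List.mem_append.1 hl with hl | hl
        · exact Or.inl ⟨l, hl, hkl, rfl⟩
        · have hleq : l = lst := List.mem_singleton.1 hl
          subst hleq
          refine Or.inr (List.mem_map.2 ⟨k, List.mem_filter.2 ⟨hkl, by simp⟩, rfl⟩)
    rw [outerA_getD fcn fcn a' k hfcn, hga']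
    by_cases hkl : k ∈ fcn
    · have hklst : k ∈ lst := (PySem.Set.mem_ofList lst k).1 hkl
      set s := (a.getD k (0, PySem.Set.empty)).2 with hsdef
      have hpair : a.getD k (0, PySem.Set.empty) = ((s.length : Int), s) := by
        rw [Prod.ext_iff]
        exact ⟨hv1, rfl⟩
      rw [if_pos hkl, hpair, gA_fold k fcn s hfcn hv2]
      set fil := fcn.filter (fun x => !(x == k) && !(s.contains x)) with hfil
      have hmemfil : ∀ x, x ∈ fil ↔ x ∈ lst ∧ x ≠ k ∧ x ∉ s := by
        intro x
        rw [hfil, List.mem_filter, hfcndef, PySem.Set.mem_ofList]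
        constructor
        · rintro ⟨hx, hp⟩
          simp only [Bool.and_eq_true, Bool.not_eq_true', beq_eq_false_iff_ne] at hp
          exact ⟨hx, hp.1, fun hm =>
            Bool.false_ne_true (hp.2.symm.trans ((PySem.Set.contains_iff s x).2 hm))⟩
        · rintro ⟨hx, hne, hns⟩
          refine ⟨hx, ?_⟩
          simp only [Bool.and_eq_true, Bool.not_eq_true', beq_eq_false_iff_ne]
          exact ⟨hne, by rw [← Bool.not_eq_true]; exact fun hc => hns ((PySem.Set.contains_iff s x).1 hc)⟩
      refine ⟨rfl, ?_, ?_, ?_, hB⟩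
      · have hdisj : s.Disjoint fil := by
          intro x hx hxf
          exact absurd hx ((hmemfil x).1 hxf).2.2
        exact List.Nodup.append hv2 (List.Nodup.filter _ hfcn) hdisj
      · rw [List.mem_append]
        rintro (hk | hk)
        · exact hv3 hk
        · exact ((hmemfil k).1 hk).2.1 rfl
      · intro x
        rw [List.mem_append, hv4 x, hmemfil x]
        unfold coOcc
        constructor
        · rintro (⟨hne, l, hl, hkl', hxl⟩ | ⟨hxl, hne, _⟩)
          · exact ⟨hne, l, List.mem_append_left _ hl, hkl', hxl⟩
          · exact ⟨hne, lst, List.mem_append_right _ (by simp), hklst, hxl⟩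
        · rintro ⟨hne, l, hl, hkl', hxl⟩
          rcases List.mem_append.1 hl with hl | hl
          · exact Or.inl ⟨hne, l, hl, hkl', hxl⟩
          · have := List.mem_singleton.1 hl
            subst this
            by_cases hxs : x ∈ s
            · exact Or.inl ((hv4 x).1 hxs)
            · exact Or.inr ⟨hxl, hne, hxs⟩
    · have hklst : k ∉ lst := fun hm => hkl ((PySem.Set.mem_ofList lst k).2 hm)
      rw [if_neg hkl]
      refine ⟨hv1, hv2, hv3, ?_, hB⟩
      intro x
      rw [hv4 x]
      unfold coOcc
      constructor
      · rintro ⟨hne, l, hl, hkl', hxl⟩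
        exact ⟨hne, l, List.mem_append_left _ hl, hkl', hxl⟩
      · rintro ⟨hne, l, hl, hkl', hxl⟩
        rcases List.mem_append.1 hl with hl | hl
        · exact ⟨hne, l, hl, hkl', hxl⟩
        · exact absurd ((List.mem_singleton.1 hl) ▸ hkl') hklst

theorem relInv_foldl (ll : List (List String)) :
    RelInv ll (ll.foldl icd_step PySem.Dict.empty) (ll.foldl icd_collect PySem.Dict.empty) := by
  suffices h : ∀ (rest pre : List (List String)) a b, RelInv pre a b →
      RelInv (pre ++ rest) (rest.foldl icd_step a) (rest.foldl icd_collect b) by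
    have := h ll [] PySem.Dict.empty PySem.Dict.empty (by
      refine ⟨rfl, List.nodup_nil, by simp, fun k => ?_⟩
      simp [coOcc])
    simpa using this
  intro rest
  induction rest with
  | nil => intro pre a b h; simpa using h
  | cons x xs ih =>
    intro pre a b h
    have h' := ih (pre ++ [x]) _ _ (relInv_step pre a b x h)
    simpa using h'

-- ===== VERDICT (by name: the statement is the Claim_ definition above) =====
theorem icd_counter2_spec : Claim_equal_icd_counter2 := by
  intro ll _
  unfold Spec_icd_counter2 icd_counter2 icd_counter2_alt
  simp only []
  obtain ⟨hkeys, hnd, hmemk, hval⟩ := relInv_foldl ll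
  set a := ll.foldl icd_step PySem.Dict.empty
  set b := ll.foldl icd_collect PySem.Dict.empty
  rw [PySem.Dict.items_eq_map_keys b hnd [], List.map_map, hkeys]
  refine List.map_congr_left (fun k hk => ?_)
  obtain ⟨hv1, hv2, hv3, hv4, hv5⟩ := hval k
  set s := (a.getD k (0, PySem.Set.empty)).2 with hsdef
  set css := b.getD k [] with hcssdef
  obtain ⟨hund, humem⟩ := foldl_union_spec css PySem.Set.empty List.nodup_nil
  set u := css.foldl PySem.Set.union PySem.Set.empty with hudef
  have hperm : (s ++ [k]).Perm u := by
    have hdisj : s.Disjoint [k] := by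
      intro x hx hxk
      exact absurd ((List.mem_singleton.1 hxk) ▸ hx) hv3
    rw [List.perm_ext_iff_of_nodup
      (List.Nodup.append hv2 (List.nodup_singleton k) hdisj) hund]
    intro x
    rw [List.mem_append, List.mem_singleton, humem x, hv4 x]
    simp only [PySem.Set.empty, List.not_mem_nil, false_or]
    constructor
    · rintro (⟨hne, l, hl, hkl, hxl⟩ | rfl)
      · exact ⟨PySem.Set.ofList l, (hv5 _).2 ⟨l, hl, hkl, rfl⟩, (PySem.Set.mem_ofList l x).2 hxl⟩
      · obtain ⟨l, hl, hkl⟩ := (hmemk x).1 hk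
        exact ⟨PySem.Set.ofList l, (hv5 _).2 ⟨l, hl, hkl, rfl⟩, (PySem.Set.mem_ofList l x).2 hkl⟩
    · rintro ⟨t, ht, hxt⟩
      obtain ⟨l, hl, hkl, rfl⟩ := (hv5 t).1 ht
      by_cases hxk : x = k
      · exact Or.inr hxk
      · exact Or.inl ⟨hxk, l, hl, hkl, (PySem.Set.mem_ofList l x).1 hxt⟩
  have hlen : u.length = s.length + 1 := by
    have := hperm.length_eq
    simpa using this.symm
  simp only [Function.comp]
  refine Prod.ext rfl ?_
  show (a.getD k (0, PySem.Set.empty)).1 = PySem.Set.len u - 1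
  rw [hv1]
  simp only [PySem.Set.len, hlen]
  push_cast
  omega
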